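-- pv_equiv track=rewrite | github.com/lagartoverde/python_random | listas.py | elimina
-- ===== SOURCE A (Python) =====
-- def tamano_lista(lista):
--     tamano=0
--     for i in lista:
--         tamano+=1
--     return tamano
--
-- def elimina(lista):
--     tamano=tamano_lista(lista)
--     listanueva=[]
--     indice=0
--     for i in lista:
--         if indice!=0 and indice!=(tamano-1):
--             listanueva.append(i)
--         indice+=1
--     return listanueva
-- ===== SOURCE B (Python) =====
-- def elimina(lista):
--     return list(lista)[1:-1]
-- ===== Notes on version B (the rewrite author's own statement) =====
-- stated objective: simpler
-- what changed: Replaces the length-counting helper and the index-filtering loop with a single closed-form slice lista[1:-1].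
import Mathlib
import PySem

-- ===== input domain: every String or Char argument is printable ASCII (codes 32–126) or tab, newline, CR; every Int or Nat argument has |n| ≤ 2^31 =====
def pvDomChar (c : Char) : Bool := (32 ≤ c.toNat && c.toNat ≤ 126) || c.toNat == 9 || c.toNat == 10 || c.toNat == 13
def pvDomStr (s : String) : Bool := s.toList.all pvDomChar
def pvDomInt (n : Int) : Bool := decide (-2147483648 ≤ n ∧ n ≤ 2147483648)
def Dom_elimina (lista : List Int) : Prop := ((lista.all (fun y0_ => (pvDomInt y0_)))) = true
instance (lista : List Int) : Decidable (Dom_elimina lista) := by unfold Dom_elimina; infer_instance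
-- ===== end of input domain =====

-- B replaces A's length-counting helper and index-filtering loop with a single slice lista[1:-1] (simpler; return-value equivalence).

-- ===== PORT A =====
def tamano_lista (lista : List Int) : Int :=
  lista.foldl (fun tamano _ => tamano + 1) 0

def elimina (lista : List Int) : List Int :=
  let tamano := tamano_lista lista
  (lista.foldl
    (fun (s : List Int × Int) i =>
      (if s.2 ≠ 0 ∧ s.2 ≠ tamano - 1 then s.1 ++ [i] else s.1, s.2 + 1))
    ([], 0)).1

-- ===== PORT B =====
def elimina_alt (lista : List Int) : List Int :=
  PySem.List.slice lista (some 1) (some (-1))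

-- ===== PRECONDITION & SPEC =====
def Spec_elimina (lista : List Int) (out : List Int) : Prop := out = elimina_alt lista
instance (lista : List Int) (out : List Int) : Decidable (Spec_elimina lista out) := by unfold Spec_elimina; infer_instance

-- ===== CLAIM (what is proved, stated in full; the proofs are below) =====
def Claim_equal_elimina : Prop := ∀ (lista : List Int), Dom_elimina lista → Spec_elimina lista (elimina lista)

-- ===== LEMMAS AND PROOFS =====

theorem tamano_eq (lista : List Int) : tamano_lista lista = (lista.length : Int) := by
  have h : ∀ (l : List Int) (a : Int), l.foldl (fun t _ => t + 1) a = a + l.length := by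
    intro l
    induction l with
    | nil => intro a; simp [List.foldl]
    | cons x xs ih => intro a; simp [List.foldl, ih]; ring
  simpa [tamano_lista] using h lista 0

theorem loop_inv (lista : List Int) (tamano : Int) (acc : List Int) (j : Nat) :
    (lista.foldl
      (fun (s : List Int × Int) i =>
        (if s.2 ≠ 0 ∧ s.2 ≠ tamano - 1 then s.1 ++ [i] else s.1, s.2 + 1))
      (acc, (j : Int))).1
    = acc ++ (lista.zipIdx j).filterMap
        (fun p => if (p.2 : Int) ≠ 0 ∧ (p.2 : Int) ≠ tamano - 1 then some p.1 else none) := by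
  induction lista generalizing acc j with
  | nil => simp
  | cons x xs ih =>
    simp only [List.foldl, List.zipIdx_cons]
    by_cases h : (j : Int) ≠ 0 ∧ (j : Int) ≠ tamano - 1
    · have hf : (fun (p : Int × Nat) =>
          if (p.2 : Int) ≠ 0 ∧ (p.2 : Int) ≠ tamano - 1 then some p.1 else none) (x, j)
          = some x := if_pos h
      rw [if_pos h]
      simp only [List.filterMap_cons, hf]
      have := ih (acc ++ [x]) (j + 1)
      push_cast at this
      rw [this]
      simp
    · have hf : (fun (p : Int × Nat) =>
          if (p.2 : Int) ≠ 0 ∧ (p.2 : Int) ≠ tamano - 1 then some p.1 else none) (x, j)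
          = none := if_neg h
      rw [if_neg h]
      simp only [List.filterMap_cons, hf]
      have := ih acc (j + 1)
      push_cast at this
      exact this

theorem slice_eq (lista : List Int) :
    PySem.List.slice lista (some 1) (some (-1)) = lista.tail.dropLast := by
  cases lista with
  | nil => decide
  | cons x xs =>
    have h : ¬ ((xs.length : Int) < 0) := by omega
    simp [PySem.List.slice, PySem.List.clampIdx, List.dropLast_eq_take, h]

theorem filter_aux (xs : List Int) (j n : Nat) (hj : 1 ≤ j) (hn : j + xs.length = n) :
    (xs.zipIdx j).filterMap
        (fun p => if (p.2 : Int) ≠ 0 ∧ (p.2 : Int) ≠ (n : Int) - 1 then some p.1 else none)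
    = xs.dropLast := by
  induction xs generalizing j with
  | nil => simp
  | cons x xs ih =>
    simp only [List.zipIdx_cons]
    cases xs with
    | nil =>
      have hlast : ¬ ((j : Int) ≠ 0 ∧ (j : Int) ≠ (n : Int) - 1) := by
        simp only [List.length_cons, List.length_nil] at hn
        intro hc; exact hc.2 (by omega)
      have hf : (fun (p : Int × Nat) =>
          if (p.2 : Int) ≠ 0 ∧ (p.2 : Int) ≠ (n : Int) - 1 then some p.1 else none) (x, j)
          = none := if_neg hlast
      simp only [List.filterMap_cons, hf]
      simp
    | cons y ys =>
      have hk : (j : Int) ≠ 0 ∧ (j : Int) ≠ (n : Int) - 1 := by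
        simp only [List.length_cons] at hn
        exact ⟨by omega, by omega⟩
      have hf : (fun (p : Int × Nat) =>
          if (p.2 : Int) ≠ 0 ∧ (p.2 : Int) ≠ (n : Int) - 1 then some p.1 else none) (x, j)
          = some x := if_pos hk
      simp only [List.filterMap_cons, hf]
      have := ih (j + 1) (by omega) (by simp only [List.length_cons] at hn ⊢; omega)
      rw [this]
      simp

theorem filter_eq_tail_dropLast (lista : List Int) :
    (lista.zipIdx 0).filterMap
        (fun p => if (p.2 : Int) ≠ 0 ∧ (p.2 : Int) ≠ (lista.length : Int) - 1 then some p.1 else none)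
    = lista.tail.dropLast := by
  cases lista with
  | nil => simp
  | cons x xs =>
    have hf : (fun (p : Int × Nat) =>
        if (p.2 : Int) ≠ 0 ∧ (p.2 : Int) ≠ ((x :: xs).length : Int) - 1 then some p.1 else none)
        (x, 0) = none := if_neg (by simp)
    rw [List.zipIdx_cons]
    simp only [List.filterMap_cons, hf]
    simpa using filter_aux xs 1 (x :: xs).length (le_refl 1) (by simp [Nat.add_comm])

-- ===== VERDICT (by name: the statement is the Claim_ definition above) =====
theorem elimina_spec : Claim_equal_elimina := by
  intro lista _
  unfold Spec_elimina elimina elimina_alt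
  rw [slice_eq, tamano_eq]
  have h := loop_inv lista (lista.length : Int) [] 0
  rw [filter_eq_tail_dropLast] at h
  simpa using h
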